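-- pv_equiv track=rewrite | github.com/juliengiraud/Rubik-s_Cube | CircuitBuilder/booleanExpressionCheck.py | circuit_reader
-- ===== SOURCE A (Python) =====
-- def validate_gate(myInput, gate):
--     bits = ["p1", "p2", "p3", "p4", "p5", "b1", "b2", "b3", "b4"]
--     for i in range(9):
--         if bits[i] in gate and myInput[i] == "0" or bits[i] + "'" in gate and myInput[i] == "1":
--             return False
--     return True
--
-- def circuit_reader(myInput, expressions):
--     # Conversion de l'expression
--     circuits = []
--     for expression_str in expressions:
--         expression = expression_str.replace(" ", "").replace("(", "").replace(")", "").split("+")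
--         circuit = []
--         for gate in expression:
--             circuit.append(gate.split("."))
--         circuits.append(circuit)
--     myExit = ["0", "0", "0", "0", "0"]
--
--     # Utilisation de l'expression
--     for i in range(5):
--         for gate in circuits[i]: # Pour toutes les portes AND de la colone du circuit
--             if validate_gate(myInput, gate): # Si l'entrée valide la porte
--                 myExit[i] = "1"
--                 break
--     exit_str = myExit[0]+myExit[1]+myExit[2]+myExit[3]+myExit[4]
--
--     return exit_str
-- ===== SOURCE B (Python) =====
-- # B: idiomatic rewrite — a name->index dict replaces the 9-way fixed scan in gate
-- # validation (iterate the gate's literals, detect a trailing apostrophe as negation),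
-- # and the output string is built by join over a comprehension instead of mutating a list.
-- _BIT_INDEX = {"p1": 0, "p2": 1, "p3": 2, "p4": 3, "p5": 4,
--               "b1": 5, "b2": 6, "b3": 7, "b4": 8}
--
-- def _gate_ok(myInput, gate):
--     for lit in gate:
--         neg = lit.endswith("'")
--         name = lit[:-1] if neg else lit
--         idx = _BIT_INDEX.get(name)
--         if idx is None:
--             continue
--         if myInput[idx] == ("1" if neg else "0"):
--             return False
--     return True
--
-- def circuit_reader(myInput, expressions):
--     circuits = [[gate.split(".") for gate in
--                  expr.replace(" ", "").replace("(", "").replace(")", "").split("+")]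
--                 for expr in expressions]
--     return "".join("1" if any(_gate_ok(myInput, g) for g in circuits[i]) else "0"
--                    for i in range(5))
-- ===== Notes on version B (the rewrite author's own statement) =====
-- stated objective: idiomatic
-- what changed: gate validation iterates the gate's literals with a name->index dict (trailing apostrophe = negation) instead of scanning the 9 fixed bit names per gate, and the output is a join over a comprehension instead of a mutated 5-slot list.
-- outside the precondition, e.g. on circuit_reader([], ['x+p1', 'x', 'x', 'x', 'x']): A returns '11111', B returns '11111'; on circuit_reader(['0'], ["b1'.p1", 'x', 'x', 'x', 'x']): A returns '01111', B raises IndexError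
import Mathlib
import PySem

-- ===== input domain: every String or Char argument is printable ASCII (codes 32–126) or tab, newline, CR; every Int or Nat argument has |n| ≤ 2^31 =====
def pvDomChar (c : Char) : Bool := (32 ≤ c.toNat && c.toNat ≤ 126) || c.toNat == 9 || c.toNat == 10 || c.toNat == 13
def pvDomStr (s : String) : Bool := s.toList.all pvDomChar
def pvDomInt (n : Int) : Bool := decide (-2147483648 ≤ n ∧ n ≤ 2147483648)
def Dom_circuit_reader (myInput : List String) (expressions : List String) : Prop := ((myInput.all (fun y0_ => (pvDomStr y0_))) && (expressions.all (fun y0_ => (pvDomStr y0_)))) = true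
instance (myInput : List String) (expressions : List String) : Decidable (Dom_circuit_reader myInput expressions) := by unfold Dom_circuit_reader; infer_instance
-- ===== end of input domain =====

-- B validates a gate by iterating its literals with a name→index dict (trailing apostrophe =
-- negation) instead of scanning the 9 fixed bit names, and builds the output by join over a
-- comprehension instead of mutating a 5-slot list; return values agree on Pre_.

-- ===== PORT A =====
def bitsA : List String := ["p1", "p2", "p3", "p4", "p5", "b1", "b2", "b3", "b4"]

-- for i in range(9): if bits[i] in gate and myInput[i]=="0" or bits[i]+"'" in gate and myInput[i]=="1": return False
def validate_gate (myInput : List String) (gate : List String) : Bool :=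
  (PySem.List.pyRange 0 9 1).all (fun i =>
    !((gate.contains (PySem.List.pyGetD bitsA i "") && (PySem.List.pyGetD myInput i "" == "0")) ||
      (gate.contains (PySem.List.pyGetD bitsA i "" ++ "'") && (PySem.List.pyGetD myInput i "" == "1"))))

-- str.split with a nonempty literal separator: PySem.Str.split? is always `some`, .getD [] is exact
def circuit_reader (myInput : List String) (expressions : List String) : String :=
  let circuits := expressions.foldl (fun acc e =>
    let expression := (PySem.Str.split? (PySem.Str.replace (PySem.Str.replace (PySem.Str.replace e " " "") "(" "") ")" "") "+").getD []
    let circuit := expression.foldl (fun c g => c ++ [(PySem.Str.split? g ".").getD []]) []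
    acc ++ [circuit]) []
  let myExit := (PySem.List.pyRange 0 5 1).foldl (fun ex i =>
    ((PySem.List.pyGetD circuits i []).foldl
      (fun (st : List String × Bool) gate =>
        if st.2 then st
        else if validate_gate myInput gate then (PySem.List.pySetD st.1 i "1", true) else st)
      (ex, false)).1) ["0", "0", "0", "0", "0"]
  PySem.List.pyGetD myExit 0 "" ++ PySem.List.pyGetD myExit 1 "" ++ PySem.List.pyGetD myExit 2 "" ++
    PySem.List.pyGetD myExit 3 "" ++ PySem.List.pyGetD myExit 4 ""

-- ===== PORT B =====
def bitIndex : PySem.Dict String Int :=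
  PySem.Dict.ofList [("p1", 0), ("p2", 1), ("p3", 2), ("p4", 3), ("p5", 4),
                     ("b1", 5), ("b2", 6), ("b3", 7), ("b4", 8)]

def gate_ok (myInput : List String) (gate : List String) : Bool :=
  gate.all (fun lit =>
    let neg := PySem.Str.endswith lit "'"
    let name := if neg then PySem.Str.slice lit none (some (-1)) else lit
    match bitIndex.get? name with
    | none => true
    | some idx => !(PySem.List.pyGetD myInput idx "" == (if neg then "1" else "0")))

def circuit_reader_alt (myInput : List String) (expressions : List String) : String :=
  let circuits := expressions.map (fun e =>
    ((PySem.Str.split? (PySem.Str.replace (PySem.Str.replace (PySem.Str.replace e " " "") "(" "") ")" "") "+").getD []).map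
      (fun g => (PySem.Str.split? g ".").getD []))
  PySem.Str.join "" ((PySem.List.pyRange 0 5 1).map (fun i =>
    if (PySem.List.pyGetD circuits i []).any (fun g => gate_ok myInput g) then "1" else "0"))

-- ===== PRECONDITION & SPEC =====
-- helper for Pre_ only (it repeats the parsing, so Pre_ stays independent of the ports)
def pvGates (e : String) : List (List String) :=
  ((PySem.Str.split? (PySem.Str.replace (PySem.Str.replace (PySem.Str.replace e " " "") "(" "") ")" "") "+").getD []).map
    (fun g => (PySem.Str.split? g ".").getD [])

-- Pre_ excludes the inputs where the Python A raises IndexError (fewer than 5 expressions, or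
-- a referenced bit index past the end of myInput); it is slightly narrower than A's exact
-- returning domain: A's early return / break can skip an out-of-range access that a later
-- literal would perform, and on such inputs B's literal-order scan may raise where A returns —
-- those inputs are excluded too (see the cites in the claim).
def Pre_circuit_reader (myInput : List String) (expressions : List String) : Prop :=
  5 ≤ expressions.length ∧
  ∀ e ∈ expressions.take 5, ∀ g ∈ pvGates e, ∀ lit ∈ g, ∀ k ∈ List.range 9,
    (lit = bitsA.getD k "" ∨ lit = bitsA.getD k "" ++ "'") → k < myInput.length

instance (myInput : List String) (expressions : List String) : Decidable (Pre_circuit_reader myInput expressions) := by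
  unfold Pre_circuit_reader; infer_instance

def pvWitness_circuit_reader : List String × List String :=
  (["1", "0", "1", "1", "1", "0", "0", "0", "0"],
   ["p1.b1'", "p2", "p1+p2", "x", "(p5 . b1')"])

def Spec_circuit_reader (myInput : List String) (expressions : List String) (out : String) : Prop := out = circuit_reader_alt myInput expressions
instance (myInput : List String) (expressions : List String) (out : String) : Decidable (Spec_circuit_reader myInput expressions out) := by unfold Spec_circuit_reader; infer_instance

-- ===== CLAIM (what is proved, stated in full; the proofs are below) =====
def Claim_equal_circuit_reader : Prop := ∀ (myInput : List String) (expressions : List String), Dom_circuit_reader myInput expressions → Pre_circuit_reader myInput expressions → Spec_circuit_reader myInput expressions (circuit_reader myInput expressions)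

-- ===== LEMMAS AND PROOFS =====

-- abbreviation used only in the proofs
def pvGet (m : List String) (k : Nat) : String := PySem.List.pyGetD m (k : Int) ""

theorem endswith_decomp (s : String) (h : PySem.Str.endswith s "'" = true) :
    s = String.ofList s.toList.dropLast ++ "'" := by
  apply String.ext
  simp at h
  rw [PySem.Chars.endswith_iff] at h
  obtain ⟨p, hp⟩ := h
  rw [← hp]
  simp

theorem slice_neg_one (s : String) :
    PySem.Str.slice s none (some (-1)) = String.ofList s.toList.dropLast := by
  apply String.ext
  rw [PySem.Str.slice_to_neg_one]
  simp

theorem get?_some (name : String) (idx : Int) (h : bitIndex.get? name = some idx) :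
    ∃ k, k < 9 ∧ name = bitsA.getD k "" ∧ idx = (k : Int) := by
  rw [show bitIndex = PySem.Dict.mk [("p1", 0), ("p2", 1), ("p3", 2), ("p4", 3), ("p5", 4),
      ("b1", 5), ("b2", 6), ("b3", 7), ("b4", 8)] from by decide] at h
  simp only [PySem.Dict.get?_mk_cons] at h
  split_ifs at h with h1 h2 h3 h4 h5 h6 h7 h8 h9
  · exact ⟨0, by omega, by simpa using (eq_of_beq h1).symm, by simpa using h.symm⟩
  · exact ⟨1, by omega, by simpa using (eq_of_beq h2).symm, by simpa using h.symm⟩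
  · exact ⟨2, by omega, by simpa using (eq_of_beq h3).symm, by simpa using h.symm⟩
  · exact ⟨3, by omega, by simpa using (eq_of_beq h4).symm, by simpa using h.symm⟩
  · exact ⟨4, by omega, by simpa using (eq_of_beq h5).symm, by simpa using h.symm⟩
  · exact ⟨5, by omega, by simpa using (eq_of_beq h6).symm, by simpa using h.symm⟩
  · exact ⟨6, by omega, by simpa using (eq_of_beq h7).symm, by simpa using h.symm⟩
  · exact ⟨7, by omega, by simpa using (eq_of_beq h8).symm, by simpa using h.symm⟩
  · exact ⟨8, by omega, by simpa using (eq_of_beq h9).symm, by simpa using h.symm⟩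
  · simp [PySem.Dict.get?] at h

theorem validate_iff (m g : List String) : validate_gate m g = true ↔
    ∀ k, k < 9 → ¬(bitsA.getD k "" ∈ g ∧ pvGet m k = "0") ∧
                 ¬(bitsA.getD k "" ++ "'" ∈ g ∧ pvGet m k = "1") := by
  unfold validate_gate
  rw [show PySem.List.pyRange 0 9 1 = (List.range 9).map (fun k : Nat => (k : Int)) from by decide]
  simp [pvGet, bitsA, bitsA, not_and, List.all_eq_true]
  constructor
  · intro H k hk; have := H k hk; tauto
  · intro H k hk; have := H k hk; tauto

theorem gate_eq (m g : List String) : validate_gate m g = gate_ok m g := by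
  rw [Bool.eq_iff_iff, validate_iff]
  unfold gate_ok
  rw [List.all_eq_true]
  constructor
  · intro H lit hlit
    by_cases hend : PySem.Str.endswith lit "'"
    · have hend' : PySem.Chars.endswith lit.toList ['\''] = true := by simpa using hend
      rcases hq : bitIndex.get? (PySem.Str.slice lit none (some (-1))) with _ | idx
      · simp [hend', hq]
      · obtain ⟨k, hk9, hname, hidx⟩ := get?_some _ _ hq
        have hlit' : lit = bitsA.getD k "" ++ "'" := by
          conv_lhs => rw [endswith_decomp lit hend, ← slice_neg_one, hname]
        have h2 := (H k hk9).2
        have hne : pvGet m k ≠ "1" := fun hc => h2 ⟨hlit' ▸ hlit, hc⟩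
        simp [hend', hq, hidx]
        simpa [pvGet] using hne
    · have hend' : PySem.Chars.endswith lit.toList ['\''] = false := by
        simpa using hend
      rcases hq : bitIndex.get? lit with _ | idx
      · simp [hend', hq]
      · obtain ⟨k, hk9, hname, hidx⟩ := get?_some _ _ hq
        have h1 := (H k hk9).1
        have hne : pvGet m k ≠ "0" := fun hc => h1 ⟨hname ▸ hlit, hc⟩
        simp [hend', hq, hidx]
        simpa [pvGet] using hne
  · intro H k hk9
    have d1 : ∀ j : Nat, j < 9 → PySem.Chars.endswith (bitsA[j]?.getD "").toList ['\''] = false := by decide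
    have d2 : ∀ j : Nat, j < 9 → bitIndex.get? (bitsA[j]?.getD "") = some (j : Int) := by decide
    have d4 : ∀ j : Nat, j < 9 → PySem.Str.slice (bitsA[j]?.getD "" ++ "'") none (some (-1)) = bitsA[j]?.getD "" := by decide
    constructor
    · rintro ⟨hmem, h0⟩
      have hb := H _ hmem
      simp only [pvGet, PySem.List.pyGetD_natCast] at h0
      simp [d1 k hk9, d2 k hk9] at hb
      exact hb (by simpa [List.getD_eq_getElem?_getD] using h0)
    · rintro ⟨hmem, h1⟩
      have hb := H _ hmem
      have d3' : ∀ j : Nat, j < 9 → PySem.Chars.endswith ((bitsA[j]?.getD "").toList ++ ['\'']) ['\''] = true := by decide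
      simp only [pvGet, PySem.List.pyGetD_natCast] at h1
      simp [d3' k hk9, d4 k hk9, d2 k hk9] at hb
      exact hb (by simpa [List.getD_eq_getElem?_getD] using h1)

theorem fold_stuck (m : List String) (gs : List (List String)) (x : List String) (i : Int) :
    gs.foldl (fun st gate => if st.2 then st
      else if validate_gate m gate then (PySem.List.pySetD st.1 i "1", true) else st) (x, true) = (x, true) := by
  induction gs with
  | nil => rfl
  | cons g gs ih => simpa using ih

theorem break_fold (m : List String) (gs : List (List String)) (ex : List String) (i : Int) :
    (gs.foldl (fun st gate => if st.2 then st
      else if validate_gate m gate then (PySem.List.pySetD st.1 i "1", true) else st) (ex, false)).1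
    = (if gs.any (fun g => gate_ok m g) then PySem.List.pySetD ex i "1" else ex) := by
  induction gs with
  | nil => rfl
  | cons g gs ih =>
    rw [List.foldl_cons, List.any_cons]
    by_cases hv : validate_gate m g
    · rw [if_neg (by simp), if_pos hv, fold_stuck]
      have hg : gate_ok m g = true := (gate_eq m g) ▸ hv
      simp [hg]
    · rw [if_neg (by simp), if_neg hv, ih]
      have hg : gate_ok m g = false := by rw [← gate_eq]; simpa using hv
      simp [hg]

theorem reader_eq (m e : List String) : circuit_reader m e = circuit_reader_alt m e := by
  unfold circuit_reader circuit_reader_alt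
  simp only [PySem.List.foldl_append_singleton_eq_map, List.nil_append]
  rw [show PySem.List.pyRange 0 5 1 = ([0, 1, 2, 3, 4] : List Int) from by decide]
  simp only [List.foldl_cons, List.foldl_nil, List.map_cons, List.map_nil, break_fold]
  generalize (e.map (fun e =>
    ((PySem.Str.split? (PySem.Str.replace (PySem.Str.replace (PySem.Str.replace e " " "") "(" "") ")" "") "+").getD []).map
      (fun g => (PySem.Str.split? g ".").getD []))) = cs
  generalize (PySem.List.pyGetD cs 0 []).any (fun g => gate_ok m g) = b0
  generalize (PySem.List.pyGetD cs 1 []).any (fun g => gate_ok m g) = b1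
  generalize (PySem.List.pyGetD cs 2 []).any (fun g => gate_ok m g) = b2
  generalize (PySem.List.pyGetD cs 3 []).any (fun g => gate_ok m g) = b3
  generalize (PySem.List.pyGetD cs 4 []).any (fun g => gate_ok m g) = b4
  cases b0 <;> cases b1 <;> cases b2 <;> cases b3 <;> cases b4 <;> rfl

-- ===== VERDICT (by name: the statement is the Claim_ definition above) =====
theorem circuit_reader_spec : Claim_equal_circuit_reader := by
  intro myInput expressions _ _
  unfold Spec_circuit_reader
  exact reader_eq myInput expressions
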